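-- pv_equiv track=rewrite | github.com/manwar/perlweeklychallenge-club | challenge-116/roger-bell-west/python/ch-1.py | ns
-- ===== SOURCE A (Python) =====
-- def ns(n):
--   ns=str(n)
--   l=len(ns)
--   for sl in range(1,int(l/2)+1):
--     i=sl
--     e=[int(ns[0:sl])]
--     while 1:
--       if l-i==0:
--         break
--       e.append(e[-1]+1)
--       es=str(e[-1])
--       el=len(es)
--       if l-i < el or ns[i:i+el] != es:
--         e=[]
--         break
--       i+=el
--     if len(e)>0:
--       return e
--   return [n]
-- ===== SOURCE B (Python) =====
-- def ns(n):
--   s = str(n)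
--
--   def seq(prev, t):
--     # parse t as str(prev+1)+str(prev+2)+...; return the parsed ints or None
--     if t == "":
--       return []
--     u = str(prev + 1)
--     if t.startswith(u):
--       r = seq(prev + 1, t[len(u):])
--       if r is not None:
--         return [prev + 1] + r
--     return None
--
--   def search(sl):
--     if 2 * sl > len(s):
--       return [n]
--     start = int(s[:sl])
--     r = seq(start, s[sl:])
--     if r is not None:
--       return [start] + r
--     return search(sl + 1)
--
--   return search(1)
-- ===== Notes on version B (the rewrite author's own statement) =====
-- stated objective: simpler
-- what changed: B is a recursive-descent decomposition: a pure recursive parser seq(prev, rest) that consumes str(prev+1) via startswith and returns the parsed tail (or None), driven by a recursive search over prefix lengths, replacing A's two nested loops with index arithmetic, in-place list mutation and an empty-list bailout flag.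
import Mathlib
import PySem

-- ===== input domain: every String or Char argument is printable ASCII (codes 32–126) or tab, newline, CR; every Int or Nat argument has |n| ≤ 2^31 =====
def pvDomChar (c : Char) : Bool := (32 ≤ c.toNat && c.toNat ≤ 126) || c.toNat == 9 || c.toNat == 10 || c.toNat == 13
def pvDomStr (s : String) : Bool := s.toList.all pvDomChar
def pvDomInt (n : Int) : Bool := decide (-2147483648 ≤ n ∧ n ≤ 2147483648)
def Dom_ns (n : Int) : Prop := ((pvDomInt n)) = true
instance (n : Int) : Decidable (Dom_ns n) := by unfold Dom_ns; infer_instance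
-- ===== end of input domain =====

-- B is a recursive-descent decomposition: a pure recursive parser consuming str(prev+1)
-- via startswith, driven by a recursive search over prefix lengths, instead of A's two
-- nested loops with index arithmetic and in-place list mutation; objective: simpler.

-- ===== PORT A =====
-- the 'while 1' loop: state (i, e); fuel bounds the iterations (i grows by ≥ 1 each pass)
def nsA_inner (s : List Char) (l : Int) : Nat → Int → List Int → List Int
  | 0, _, e => e
  | fuel+1, i, e =>
    if l - i = 0 then e
    else
      let last := (PySem.List.pyGet? e (-1)).getD 0
      let e' := e ++ [last + 1]
      let es := PySem.Int.toChars (last + 1)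
      let el : Int := (es.length : Int)
      if l - i < el ∨ PySem.List.slice s (some i) (some (i + el)) ≠ es then []
      else nsA_inner s l fuel (i + el) e'

-- the 'for sl in range(...)' loop with its early return
def nsA_outer (n : Int) (s : List Char) (l : Int) : List Int → List Int
  | [] => [n]
  | sl :: rest =>
    let start := (PySem.Int.ofChars? (PySem.List.slice s (some 0) (some sl))).getD 0
    let e := nsA_inner s l (l.toNat + 1) sl [start]
    if e.length > 0 then e else nsA_outer n s l rest

def ns (n : Int) : List Int :=
  let s := PySem.Int.toChars n
  let l : Int := s.length
  nsA_outer n s l (PySem.List.pyRange 1 (PySem.Int.floordiv l 2 + 1) 1)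

-- ===== PORT B =====
-- 'def seq(prev, t)': recursive parser; fuel bounds the recursion depth (t shrinks each call)
def nsB_seq : Nat → Int → List Char → Option (List Int)
  | 0, _, _ => none
  | fuel+1, prev, t =>
    if t = [] then some []
    else
      let u := PySem.Int.toChars (prev + 1)
      if PySem.Chars.startswith t u then
        match nsB_seq fuel (prev + 1) (t.drop u.length) with
        | some r => some ((prev + 1) :: r)
        | none => none
      else none

-- 'def search(sl)': recursion over the prefix length; fuel bounds the depth
def nsB_search (n : Int) (s : List Char) : Nat → Int → List Int
  | 0, _ => [n]
  | fuel+1, sl =>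
    if 2 * sl > (s.length : Int) then [n]
    else
      let start := (PySem.Int.ofChars? (PySem.List.slice s (some 0) (some sl))).getD 0
      match nsB_seq (s.length + 1) start (PySem.List.slice s (some sl) none) with
      | some r => start :: r
      | none => nsB_search n s fuel (sl + 1)

def ns_alt (n : Int) : List Int :=
  let s := PySem.Int.toChars n
  nsB_search n s (s.length + 1) 1

-- ===== PRECONDITION & SPEC =====
-- A raises ValueError on every negative n (int('-') on the one-character prefix); excluded.
def Pre_ns (n : Int) : Prop := 0 ≤ n
instance (n : Int) : Decidable (Pre_ns n) := by unfold Pre_ns; infer_instance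
def pvWitness_ns : Int := 1234

def Spec_ns (n : Int) (out : List Int) : Prop := out = ns_alt n
instance (n : Int) (out : List Int) : Decidable (Spec_ns n out) := by unfold Spec_ns; infer_instance

-- ===== CLAIM (what is proved, stated in full; the proofs are below) =====
def Claim_equal_ns : Prop := ∀ (n : Int), Dom_ns n → Pre_ns n → Spec_ns n (ns n)

-- ===== LEMMAS AND PROOFS =====

-- specification intermediary: consume rem by successive decimal strings str(k+1), str(k+2), …
def pvChain (k : Int) (rem : List Char) : Nat → Option Int
  | 0 => none
  | fuel+1 =>
    if rem = [] then some k
    else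
      let t := PySem.Int.toChars (k + 1)
      if t.length ≤ rem.length ∧ rem.take t.length = t then
        pvChain (k + 1) (rem.drop t.length) fuel
      else none

theorem pvChain_le {k : Int} {rem : List Char} {fuel : Nat} {m : Int}
    (h : pvChain k rem fuel = some m) : k ≤ m := by
  induction fuel generalizing k rem with
  | zero => simp [pvChain] at h
  | succ f ih =>
    simp only [pvChain] at h
    split_ifs at h with h1 h2
    · cases h; omega
    · have := ih h; omega

theorem toChars_length_pos (k : Int) : 0 < (PySem.Int.toChars k).length := by
  unfold PySem.Int.toChars
  split
  · simp
  · exact Nat.length_toDigits_pos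

theorem nsA_inner_chain (s : List Char) (i : Int) (k : Int) (e : List Int) (fuel : Nat)
    (hi : 0 ≤ i) (hil : i ≤ (s.length : Int))
    (hfuel : ((s.length : Int) - i).toNat < fuel)
    (hlast : PySem.List.pyGet? e (-1) = some k) :
    nsA_inner s (s.length : Int) fuel i e =
      match pvChain k (s.drop i.toNat) fuel with
      | some m => e ++ PySem.List.pyRange (k + 1) (m + 1) 1
      | none => [] := by
  induction fuel generalizing i k e with
  | zero => omega
  | succ f ih =>
    have hrem : (s.drop i.toNat).length = s.length - i.toNat := List.length_drop
    by_cases hend : (s.length : Int) - i = 0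
    · have hdrop : s.drop i.toNat = [] := by
        apply List.drop_eq_nil_of_le; omega
      simp only [nsA_inner, if_pos hend, pvChain, hdrop, reduceIte]
      rw [PySem.List.pyRange_one_eq_nil (by omega), List.append_nil]
    · have hlt : i < (s.length : Int) := lt_of_le_of_ne hil (by omega)
      have hne : s.drop i.toNat ≠ [] := by
        intro hnil
        rw [hnil] at hrem
        simp at hrem
        omega
      simp only [nsA_inner, if_neg hend, hlast, Option.getD_some]
      set es := PySem.Int.toChars (k + 1) with hes
      have hel1 : 0 < es.length := toChars_length_pos (k + 1)
      have hslice : PySem.List.slice s (some i) (some (i + (es.length : Int)))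
          = (s.drop i.toNat).take es.length := by
        rw [PySem.List.slice_toNat s hi (by omega)]
        congr 1
        omega
      simp only [pvChain, if_neg hne]
      by_cases hc : es.length ≤ (s.drop i.toNat).length ∧ (s.drop i.toNat).take es.length = es
      · have hcond : ¬ ((s.length : Int) - i < (es.length : Int) ∨
            PySem.List.slice s (some i) (some (i + (es.length : Int))) ≠ es) := by
          push Not
          constructor
          · omega
          · rw [hslice]; exact hc.2
        rw [if_neg hcond, if_pos hc]
        have hdd : (s.drop i.toNat).drop es.length = s.drop (i + (es.length : Int)).toNat := by
          rw [List.drop_drop]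
          congr 1
          omega
        rw [hdd]
        have hcl : es.length ≤ s.length - i.toNat := hrem ▸ hc.1
        have g1 : (0:Int) ≤ i + (es.length : Int) := by omega
        have g2 : i + (es.length : Int) ≤ (s.length : Int) := by omega
        have g3 : ((s.length : Int) - (i + (es.length : Int))).toNat < f := by omega
        rw [ih (i + es.length) (k + 1) (e ++ [k + 1]) g1 g2 g3
          (PySem.List.pyGet?_neg_one_append_singleton e (k + 1))]
        cases hch : pvChain (k + 1) (s.drop (i + (es.length : Int)).toNat) f with
        | none => rfl
        | some m =>
          have hkm : k + 1 ≤ m := pvChain_le hch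
          simp only
          conv_rhs => rw [PySem.List.pyRange_one_cons (show k + 1 < m + 1 by omega)]
          simp
      · have hcond : ((s.length : Int) - i < (es.length : Int) ∨
            PySem.List.slice s (some i) (some (i + (es.length : Int))) ≠ es) := by
          rcases Decidable.not_and_iff_or_not.mp hc with h | h
          · left; omega
          · right; rw [hslice]; exact h
        rw [if_pos hcond, if_neg hc]

-- B's parser agrees with the same chain specification
theorem nsB_seq_chain (fuel : Nat) (prev : Int) (t : List Char)
    (hfuel : t.length < fuel) :
    nsB_seq fuel prev t =
      match pvChain prev t fuel with
      | some m => some (PySem.List.pyRange (prev + 1) (m + 1) 1)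
      | none => none := by
  induction fuel generalizing prev t with
  | zero => omega
  | succ f ih =>
    by_cases hnil : t = []
    · simp only [nsB_seq, pvChain, if_pos hnil]
      rw [PySem.List.pyRange_one_eq_nil (by omega)]
    · simp only [nsB_seq, pvChain, if_neg hnil]
      set u := PySem.Int.toChars (prev + 1) with hu
      have hu1 : 0 < u.length := toChars_length_pos (prev + 1)
      by_cases hc : u.length ≤ t.length ∧ t.take u.length = u
      · have hpre : PySem.Chars.startswith t u = true := by
          rw [PySem.Chars.startswith_iff]
          exact List.prefix_iff_eq_take.mpr hc.2.symm
        rw [if_pos hc, hpre, if_pos rfl]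
        have hlen : (t.drop u.length).length < f := by
          have := List.length_drop (l := t) (i := u.length)
          omega
        rw [ih (prev + 1) (t.drop u.length) hlen]
        cases hch : pvChain (prev + 1) (t.drop u.length) f with
        | none => rfl
        | some m =>
          have hm : prev + 1 ≤ m := pvChain_le hch
          simp only
          rw [PySem.List.pyRange_one_cons (show prev + 1 < m + 1 by omega)]
      · rw [if_neg hc]
        have hpre : PySem.Chars.startswith t u = false := by
          rw [Bool.eq_false_iff]
          intro habs
          have hp := (PySem.Chars.startswith_iff t u).mp habs
          exact hc ⟨hp.length_le, (List.prefix_iff_eq_take.mp hp).symm⟩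
        rw [hpre]
        simp

-- the two outer searches in lockstep over the prefix length
theorem outer_eq (n : Int) (s : List Char) (fuel : Nat) (sl : Int)
    (h1 : 1 ≤ sl) (hfuel : (s.length : Int) < 2 * (sl + fuel)) :
    nsA_outer n s (s.length : Int)
        (PySem.List.pyRange sl (PySem.Int.floordiv (s.length : Int) 2 + 1) 1)
      = nsB_search n s fuel sl := by
  induction fuel generalizing sl with
  | zero =>
    have hdiv : PySem.Int.floordiv (s.length : Int) 2 = (s.length : Int) / 2 :=
      PySem.Int.floordiv_eq_ediv_of_pos (by omega)
    rw [PySem.List.pyRange_one_eq_nil (by omega)]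
    rfl
  | succ f ih =>
    have hdiv : PySem.Int.floordiv (s.length : Int) 2 = (s.length : Int) / 2 :=
      PySem.Int.floordiv_eq_ediv_of_pos (by omega)
    by_cases hstop : 2 * sl > (s.length : Int)
    · rw [PySem.List.pyRange_one_eq_nil (by omega)]
      simp only [nsB_search, if_pos hstop]
      rfl
    · have hsl2 : sl < PySem.Int.floordiv (s.length : Int) 2 + 1 := by omega
      rw [PySem.List.pyRange_one_cons hsl2]
      simp only [nsA_outer, nsB_search, if_neg hstop]
      rw [show ((s.length : Int)).toNat = s.length from Int.toNat_natCast _]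
      set start := (PySem.Int.ofChars? (PySem.List.slice s (some 0) (some sl))).getD 0 with hstart
      have hsdrop : PySem.List.slice s (some sl) none = s.drop sl.toNat :=
        PySem.List.slice_from s (by omega)
      have hA := nsA_inner_chain s sl start [start] (s.length + 1) (by omega) (by omega)
        (by omega) (by rw [PySem.List.pyGet?_neg_one]; rfl)
      have hB := nsB_seq_chain (s.length + 1) start (s.drop sl.toNat)
        (by have := List.length_drop (l := s) (i := sl.toNat); omega)
      rw [hsdrop, hB, hA]
      cases hch : pvChain start (s.drop sl.toNat) (s.length + 1) with
      | some m =>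
        have hm : start ≤ m := pvChain_le hch
        simp only
        rw [if_pos (by simp)]
        rfl
      | none =>
        simp only
        rw [if_neg (by simp)]
        exact ih (sl + 1) (by omega) (by omega)

theorem ns_eq_alt (n : Int) : ns n = ns_alt n := by
  show nsA_outer n (PySem.Int.toChars n) _ _ = nsB_search n (PySem.Int.toChars n) _ 1
  exact outer_eq n (PySem.Int.toChars n) ((PySem.Int.toChars n).length + 1) 1
    (by omega) (by omega)

-- ===== VERDICT (by name: the statement is the Claim_ definition above) =====
theorem ns_spec : Claim_equal_ns := by
  intro n _ _
  unfold Spec_ns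
  exact ns_eq_alt n
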